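-- pv_equiv track=rewrite | github.com/vmarkeu/paragraphs-extraction | DIP Part B.py | findNonConsecutive
-- ===== SOURCE A (Python) =====
-- def findNonConsecutive(array_name):
--     # define an empty array
--     non_consecutive_array = []
--
--     # set the start to the first value (which is the index of image) in the array_name
--     start = array_name[0]
--
--     # then set index as 0
--     index = 0
--
--     # for start index only
--     if array_name[0] != 0:
--         # this is to store the start index of the array_name into the array we want (non_consecutive array)
--         non_consecutive_array.append(start)
--
--     # then loop through the values in the array_name
--     for value in array_name:
--         # if the value is same as the start value, the start and index will increase by 1
--         if start == value:
--             start += 1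
--             index += 1
--             continue
--
--         # then it will append the value into the non_consecutive array
--         non_consecutive_array.append(value)
--         start = value + 1
--         index += 1
--
--     return non_consecutive_array
-- ===== SOURCE B (Python) =====
-- def findNonConsecutive(array_name):
--     # Divide and conquer: run-start values of a segment = run-starts of the left half
--     # followed by run-starts of the right half, dropping the right half's first start
--     # when the two halves join into one consecutive run at the midpoint.
--     def starts(lo, hi):
--         # run-start values inside array_name[lo:hi] (hi > lo); always includes array_name[lo]
--         if hi - lo == 1:
--             return [array_name[lo]]
--         mid = (lo + hi) // 2
--         left = starts(lo, mid)
--         right = starts(mid, hi)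
--         if array_name[mid] == array_name[mid - 1] + 1:
--             right = right[1:]
--         return left + right
--     s = starts(0, len(array_name)) if array_name else []
--     return s if array_name[0] != 0 else s[1:]
-- ===== Notes on version B (the rewrite author's own statement) =====
-- stated objective: alternative
-- what changed: B computes the run-start list by divide and conquer: it recursively collects the run starts of each half of the index range and merges them, dropping the right half's first start when the halves join into one consecutive run at the midpoint, instead of A's single left-to-right pass threading a synthetic running 'start' counter.
import Mathlib
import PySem

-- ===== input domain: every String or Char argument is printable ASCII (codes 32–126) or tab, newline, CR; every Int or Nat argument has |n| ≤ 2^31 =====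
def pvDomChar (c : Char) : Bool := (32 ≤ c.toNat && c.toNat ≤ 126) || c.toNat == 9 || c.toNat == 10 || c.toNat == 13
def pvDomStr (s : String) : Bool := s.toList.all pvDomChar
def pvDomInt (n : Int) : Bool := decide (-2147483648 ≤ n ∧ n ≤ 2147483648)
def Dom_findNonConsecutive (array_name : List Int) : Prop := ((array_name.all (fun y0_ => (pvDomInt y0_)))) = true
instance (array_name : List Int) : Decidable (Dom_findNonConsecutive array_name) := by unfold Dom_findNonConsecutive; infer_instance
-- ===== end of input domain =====

-- B replaces A's single left-to-right pass with a divide-and-conquer merge of the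
-- run-start lists of the two halves (alternative decomposition, same O(n) work);
-- equivalence is proved on non-empty lists (A raises IndexError on []).


-- ===== PORT A =====
-- A: start = array_name[0]; seed [start] if array_name[0] != 0; then fold over the whole
-- list threading (start, acc): equal → start+1, else append value and start = value+1.
-- (A's 'index' variable is dead state and is omitted; array_name[0] raises on [] → Pre_.)
def findNonConsecutive (array_name : List Int) : List Int :=
  match PySem.List.pyGet? array_name 0 with
  | none => []   -- unreachable under Pre_ (IndexError in Python)
  | some start =>
    let init : List Int := if start ≠ 0 then [start] else []
    (array_name.foldl
      (fun (s : Int × List Int) value =>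
        if s.1 == value then (s.1 + 1, s.2)
        else (value + 1, s.2 ++ [value]))
      (start, init)).2

-- ===== PORT B =====
-- B helper: run-start values inside array_name[lo:hi] (hi > lo), divide and conquer.
def pvStarts (a : List Int) (lo hi : Nat) : List Int :=
  if _h1 : hi ≤ lo then []        -- unreachable for the hi > lo calls B makes (totality guard)
  else if _h2 : hi - lo = 1 then [a.getD lo 0]
  else
    let mid := (lo + hi) / 2
    let left := pvStarts a lo mid
    let right := pvStarts a mid hi
    left ++ (if a.getD mid 0 == a.getD (mid - 1) 0 + 1 then right.tail else right)
termination_by hi - lo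
decreasing_by all_goals omega

-- B: merge the run-start lists of the two halves, then drop the head iff array_name[0] == 0.
def findNonConsecutive_alt (array_name : List Int) : List Int :=
  match PySem.List.pyGet? array_name 0 with
  | none => []   -- unreachable under Pre_ (IndexError in Python)
  | some a0 =>
    let s := pvStarts array_name 0 array_name.length
    if a0 ≠ 0 then s else s.tail

-- ===== PRECONDITION & SPEC =====
-- A evaluates array_name[0], which raises IndexError on the empty list.
def Pre_findNonConsecutive (array_name : List Int) : Prop := array_name ≠ []
instance (array_name : List Int) : Decidable (Pre_findNonConsecutive array_name) := by unfold Pre_findNonConsecutive; infer_instance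
def pvWitness_findNonConsecutive : List Int := [3, 4, 7]

def Spec_findNonConsecutive (array_name : List Int) (out : List Int) : Prop := out = findNonConsecutive_alt array_name
instance (array_name : List Int) (out : List Int) : Decidable (Spec_findNonConsecutive array_name out) := by unfold Spec_findNonConsecutive; infer_instance

-- ===== CLAIM (what is proved, stated in full; the proofs are below) =====
def Claim_equal_findNonConsecutive : Prop := ∀ (array_name : List Int), Dom_findNonConsecutive array_name → Pre_findNonConsecutive array_name → Spec_findNonConsecutive array_name (findNonConsecutive array_name)

-- ===== LEMMAS AND PROOFS =====

-- The common reference: pairwise run-start filter threading the true previous element.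
def pvP (prev : Int) : List Int → List Int
  | [] => []
  | v :: t => (if v = prev + 1 then [] else [v]) ++ pvP v t

lemma pvP_append (xs : List Int) : ∀ (p : Int) (ys : List Int),
    pvP p (xs ++ ys) = pvP p xs ++ pvP (xs.getLastD p) ys := by
  induction xs with
  | nil => intro p ys; simp [pvP]
  | cons v t ih =>
    intro p ys
    simp only [List.cons_append, pvP, ih v ys, List.append_assoc]
    congr 2
    cases t with
    | nil => simp
    | cons h t' =>
      cases hq : (h :: t').getLast? with
      | none => simp at hq
      | some x => simp [hq]

-- A's loop from state (prev+1, acc) over l appends exactly pvP prev l.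
lemma pv_loop_eq (l : List Int) : ∀ (prev : Int) (acc : List Int),
    (l.foldl
      (fun (s : Int × List Int) value =>
        if s.1 == value then (s.1 + 1, s.2)
        else (value + 1, s.2 ++ [value]))
      (prev + 1, acc)).2
  = acc ++ pvP prev l := by
  induction l with
  | nil => intro prev acc; simp [pvP]
  | cons v t ih =>
    intro prev acc
    simp only [List.foldl_cons]
    by_cases h : v = prev + 1
    · subst h
      simp only [beq_self_eq_true, if_pos]
      rw [ih (prev + 1) acc]
      simp [pvP]
    · have hb : (prev + 1 == v) = false := by
        simp only [beq_eq_false_iff_ne]; exact fun he => h he.symm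
      simp only [hb, Bool.false_eq_true, if_false]
      rw [ih v (acc ++ [v])]
      simp [pvP, h]

def pvG (a : List Int) (i : Nat) : Int := a.getD i 0

def pvSlice (a : List Int) (lo hi : Nat) : List Int :=
  (List.range' lo (hi - lo)).map (pvG a)

lemma range'_map_getLastD (a : List Int) : ∀ (k s : Nat) (p : Int),
    ((List.range' s k).map (pvG a)).getLastD p
      = if k = 0 then p else pvG a (s + k - 1) := by
  intro k
  induction k with
  | zero => intro s p; simp
  | succ n ih =>
    intro s p
    rw [List.range'_succ, List.map_cons, List.getLastD_cons, ih (s + 1) (pvG a s)]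
    by_cases hn : n = 0
    · simp [hn]
    · simp only [hn, Nat.succ_ne_zero]
      have : s + 1 + n - 1 = s + (n + 1) - 1 := by omega
      simp [this]

-- Characterisation of B's divide-and-conquer helper.
lemma pvStarts_eq (a : List Int) : ∀ (d lo hi : Nat), hi - lo = d → lo < hi →
    pvStarts a lo hi = pvG a lo :: pvP (pvG a lo) (pvSlice a (lo + 1) hi) := by
  intro d
  induction d using Nat.strong_induction_on with
  | _ d ih =>
    intro lo hi hd hlt
    rw [pvStarts]
    by_cases h1 : hi ≤ lo
    · omega
    · simp only [dif_neg h1]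
      by_cases h2 : hi - lo = 1
      · have : hi = lo + 1 := by omega
        subst this
        simp [pvSlice, pvP, pvG]
      · simp only [dif_neg h2]
        have hmidlt : lo < (lo + hi) / 2 ∧ (lo + hi) / 2 < hi := by omega
        set mid := (lo + hi) / 2 with hmid
        have hL := ih (mid - lo) (by omega) lo mid rfl hmidlt.1
        have hR := ih (hi - mid) (by omega) mid hi rfl hmidlt.2
        rw [hL, hR]
        have hsplit : pvSlice a (lo + 1) hi = pvSlice a (lo + 1) mid ++ pvSlice a mid hi := by
          simp only [pvSlice]
          rw [← List.map_append]
          congr 1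
          have h := @List.range'_append (lo + 1) (mid - (lo + 1)) (hi - mid) 1
          simp only [Nat.one_mul] at h
          rw [show lo + 1 + (mid - (lo + 1)) = mid by omega] at h
          rw [show hi - (lo + 1) = (mid - (lo + 1)) + (hi - mid) by omega]
          exact h.symm
        have hmidslice : pvSlice a mid hi = pvG a mid :: pvSlice a (mid + 1) hi := by
          simp only [pvSlice]
          have h1 : hi - mid = (hi - (mid + 1)) + 1 := by omega
          rw [h1, List.range'_succ, List.map_cons]
        have hlast : (pvSlice a (lo + 1) mid).getLastD (pvG a lo) = pvG a (mid - 1) := by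
          simp only [pvSlice]
          rw [range'_map_getLastD a (mid - (lo + 1)) (lo + 1) (pvG a lo)]
          by_cases hk : mid - (lo + 1) = 0
          · have : mid - 1 = lo := by omega
            simp [hk, this]
          · have : lo + 1 + (mid - (lo + 1)) - 1 = mid - 1 := by omega
            simp [hk, this]
        rw [hsplit, pvP_append, hlast, hmidslice]
        simp only [pvP]
        by_cases hc : pvG a mid = pvG a (mid - 1) + 1
        · have hc' : a[mid]?.getD 0 = a[mid - 1]?.getD 0 + 1 := by
            simpa [pvG, List.getD_eq_getElem?_getD] using hc
          simp [hc, hc']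
        · have hc' : ¬ a[mid]?.getD 0 = a[mid - 1]?.getD 0 + 1 := by
            simpa [pvG, List.getD_eq_getElem?_getD] using hc
          simp [hc, hc']

lemma pvSlice_tail (a0 : Int) (rest : List Int) :
    pvSlice (a0 :: rest) 1 (a0 :: rest).length = rest := by
  simp only [pvSlice, List.length_cons]
  have h1 : rest.length + 1 - 1 = rest.length := by omega
  rw [h1]
  apply List.ext_getElem
  · simp
  · intro i hi1 hi2
    simp only [List.getElem_map, List.getElem_range']
    simp [pvG, List.getD, Nat.add_comm 1 i, List.getElem?_eq_getElem hi2]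

-- ===== VERDICT (by name: the statement is the Claim_ definition above) =====
theorem findNonConsecutive_spec : Claim_equal_findNonConsecutive := by
  intro array_name _hdom hpre
  unfold Spec_findNonConsecutive
  match array_name with
  | [] => exact absurd rfl hpre
  | a0 :: rest =>
    show findNonConsecutive (a0 :: rest) = findNonConsecutive_alt (a0 :: rest)
    have h0 : PySem.List.pyGet? (a0 :: rest) 0 = some a0 := by
      simp [PySem.List.pyGet?, PySem.List.pyIdx?]
    unfold findNonConsecutive findNonConsecutive_alt
    rw [h0]
    simp only [List.foldl_cons, beq_self_eq_true, if_pos]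
    have hstarts : pvStarts (a0 :: rest) 0 (a0 :: rest).length
        = a0 :: pvP a0 rest := by
      rw [pvStarts_eq (a0 :: rest) (a0 :: rest).length 0 (a0 :: rest).length rfl (by simp)]
      rw [show (0 : Nat) + 1 = 1 from rfl, pvSlice_tail]
      rfl
    rw [hstarts]
    have hloop := pv_loop_eq rest a0 (if a0 ≠ 0 then [a0] else [])
    rw [hloop]
    by_cases h : a0 = 0 <;> simp [h]
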